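-- pv_equiv track=rewrite | github.com/nikiteslyuk/Teslyuk_NS_321_prac | 20241015/1/prog.py | parse
-- ===== SOURCE A (Python) =====
-- def parse(st):
--     st = st.lower()
--     s = set()
--     for i in range(len(st) - 1):
--         tmp = st[i:i + 2]
--         if tmp[0].isalpha() and tmp[1].isalpha():
--             s.add(tmp)
--     return len(s)
-- ===== SOURCE B (Python) =====
-- def parse(st):
--     st = st.lower()
--     # split into maximal runs of alphabetic characters
--     runs = []
--     cur = []
--     for ch in st:
--         if ch.isalpha():
--             cur.append(ch)
--         elif cur:
--             runs.append(cur)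
--             cur = []
--     if cur:
--         runs.append(cur)
--     # collect adjacent pairs within each run
--     bigrams = set()
--     for run in runs:
--         for a, b in zip(run, run[1:]):
--             bigrams.add(a + b)
--     return len(bigrams)
-- ===== Notes on version B (the rewrite author's own statement) =====
-- stated objective: alternative
-- what changed: Instead of a per-index guarded pass over all positions with 2-char slices, B first segments the lowercased string into maximal runs of alphabetic characters and then collects the adjacent pairs inside each run into the set.
import Mathlib
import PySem

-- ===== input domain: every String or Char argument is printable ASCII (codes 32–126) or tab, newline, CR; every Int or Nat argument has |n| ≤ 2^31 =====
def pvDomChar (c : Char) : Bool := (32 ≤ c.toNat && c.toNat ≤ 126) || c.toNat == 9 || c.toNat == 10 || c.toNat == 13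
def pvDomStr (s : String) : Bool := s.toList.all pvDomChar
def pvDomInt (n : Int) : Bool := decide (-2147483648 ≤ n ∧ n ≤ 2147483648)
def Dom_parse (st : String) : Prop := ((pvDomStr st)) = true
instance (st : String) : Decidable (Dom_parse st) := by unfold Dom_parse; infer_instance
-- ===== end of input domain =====

-- B replaces A's per-index guarded pass (2-char slices at every position) by splitting the
-- lowercased string into maximal alphabetic runs and collecting adjacent pairs inside each run:
-- a different decomposition of the same O(n) count (objective: alternative).

-- ===== PORT A =====
def parse (st : String) : Int :=
  let stl := PySem.Str.lower st
  let s : PySem.Set String :=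
    (PySem.List.pyRange 0 (PySem.Str.len stl - 1) 1).foldl
      (fun s i =>
        let tmp := PySem.Str.slice stl (some i) (some (i + 2))
        -- tmp[0].isalpha() and tmp[1].isalpha(); tmp always has length 2 here, so the
        -- IndexError branch (none) is unreachable and ported as 'false'
        match PySem.Str.pyGet? tmp 0, PySem.Str.pyGet? tmp 1 with
        | some a, some b =>
            if PySem.Chars.isalpha a && PySem.Chars.isalpha b then PySem.Set.add s tmp else s
        | _, _ => s)
      PySem.Set.empty
  PySem.Set.len s

-- ===== PORT B =====
def parse_alt (st : String) : Int :=
  let cs := PySem.Chars.lower st.toList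
  -- for ch in st: accumulate (runs, cur)
  let p : List (List Char) × List Char :=
    cs.foldl
      (fun (p : List (List Char) × List Char) ch =>
        if PySem.Chars.isalpha ch then (p.1, p.2 ++ [ch])
        else if p.2 ≠ [] then (p.1 ++ [p.2], []) else p)
      ([], [])
  let runs := if p.2 ≠ [] then p.1 ++ [p.2] else p.1
  let bigrams : PySem.Set String :=
    runs.foldl
      (fun s run =>
        (run.zip (PySem.List.slice run (some 1) none)).foldl
          (fun s ab => PySem.Set.add s (String.ofList [ab.1, ab.2])) s)
      PySem.Set.empty
  PySem.Set.len bigrams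


-- ===== PRECONDITION & SPEC =====
def Spec_parse (st : String) (out : Int) : Prop := out = parse_alt st
instance (st : String) (out : Int) : Decidable (Spec_parse st out) := by unfold Spec_parse; infer_instance

-- ===== CLAIM (what is proved, stated in full; the proofs are below) =====
def Claim_equal_parse : Prop := ∀ (st : String), Dom_parse st → Spec_parse st (parse st)

-- ===== LEMMAS AND PROOFS =====

def adjPairs : List Char → List (Char × Char)
  | a :: b :: t => (a, b) :: adjPairs (b :: t)
  | _ => []

def alphaPairs (cs : List Char) : List (Char × Char) :=
  (adjPairs cs).filter (fun ab => PySem.Chars.isalpha ab.1 && PySem.Chars.isalpha ab.2)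

-- zip l (tail l) = adjPairs l
lemma zip_tail_eq_adjPairs (l : List Char) : l.zip l.tail = adjPairs l := by
  match l with
  | [] => simp [adjPairs]
  | [a] => simp [adjPairs]
  | a :: b :: t => simp [adjPairs, ← zip_tail_eq_adjPairs (b :: t)]

-- conditional-add fold is an update with the filtered/mapped list
lemma foldl_add_if {β : Type} (c : β → Bool) (f : β → String) (l : List β) (s0 : PySem.Set String) :
    l.foldl (fun s x => if c x then PySem.Set.add s (f x) else s) s0
      = PySem.Set.update s0 ((l.filter c).map f) := by
  induction l generalizing s0 with
  | nil => simp [PySem.Set.update]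
  | cons x t ih =>
    by_cases h : c x <;>
      simp [h, ih, PySem.Set.update, List.foldl_cons]

lemma A_range_pairs (cs : List Char) :
    (List.range (cs.length - 1)).map (fun i => (cs.drop i).take 2)
      = (adjPairs cs).map (fun ab => [ab.1, ab.2]) := by
  match cs with
  | [] => simp [adjPairs]
  | [a] => simp [adjPairs]
  | a :: b :: t =>
    have ih := A_range_pairs (b :: t)
    simp only [List.length_cons, adjPairs, List.map_cons]
    rw [show (t.length + 1 + 1 - 1) = (b :: t).length - 1 + 1 by simp,
      List.range_succ_eq_map]
    simp only [List.map_cons, List.map_map]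
    rw [← ih]
    simp [Function.comp]

-- B's run-splitting step and finishing
def runStep (p : List (List Char) × List Char) (ch : Char) : List (List Char) × List Char :=
  if PySem.Chars.isalpha ch then (p.1, p.2 ++ [ch])
  else if p.2 ≠ [] then (p.1 ++ [p.2], []) else p

def runFinish (p : List (List Char) × List Char) : List (List Char) :=
  if p.2 ≠ [] then p.1 ++ [p.2] else p.1

-- pairs still to be produced from the pending run `cur` and the remaining input
def pending : List Char → List Char → List (Char × Char)
  | cur, [] => adjPairs cur
  | cur, c :: t =>
    if PySem.Chars.isalpha c then pending (cur ++ [c]) t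
    else adjPairs cur ++ pending [] t

lemma runs_flat (cs : List Char) (runs : List (List Char)) (cur : List Char) :
    (runFinish (cs.foldl runStep (runs, cur))).flatMap adjPairs
      = runs.flatMap adjPairs ++ pending cur cs := by
  induction cs generalizing runs cur with
  | nil =>
    by_cases h : cur = [] <;> simp [runFinish, pending, h, adjPairs]
  | cons c t ih =>
    by_cases hc : PySem.Chars.isalpha c
    · simp [runStep, hc, ih, pending]
    · by_cases h : cur = []
      · simp [runStep, hc, h, ih, pending, adjPairs]
      · simp [runStep, hc, h, ih, pending]

lemma mem_adjPairs {ab : Char × Char} {l : List Char} (h : ab ∈ adjPairs l) :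
    ab.1 ∈ l ∧ ab.2 ∈ l := by
  match l with
  | [] => simp [adjPairs] at h
  | [a] => simp [adjPairs] at h
  | a :: b :: t =>
    simp only [adjPairs, List.mem_cons] at h
    rcases h with h | h
    · subst h; simp
    · have := mem_adjPairs h
      exact ⟨by simp only [List.mem_cons] at this ⊢; tauto, by simp only [List.mem_cons] at this ⊢; tauto⟩

lemma alphaPairs_of_all (l : List Char) (h : ∀ c ∈ l, PySem.Chars.isalpha c) :
    alphaPairs l = adjPairs l := by
  unfold alphaPairs
  rw [List.filter_eq_self]
  intro ab hab
  have := mem_adjPairs hab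
  simp [h _ this.1, h _ this.2]

lemma alphaPairs_head_not {c : Char} (t : List Char) (hc : ¬ PySem.Chars.isalpha c) :
    alphaPairs (c :: t) = alphaPairs t := by
  match t with
  | [] => simp [alphaPairs, adjPairs]
  | b :: t' => simp [alphaPairs, adjPairs, hc]

lemma alphaPairs_boundary (xs : List Char) {c : Char} (t : List Char)
    (hxs : ∀ a ∈ xs, PySem.Chars.isalpha a) (hc : ¬ PySem.Chars.isalpha c) :
    alphaPairs (xs ++ c :: t) = alphaPairs xs ++ alphaPairs t := by
  match xs with
  | [] =>
    have := alphaPairs_head_not t hc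
    unfold alphaPairs at this
    simpa [alphaPairs, adjPairs] using this
  | [a] =>
    simp only [List.cons_append, List.nil_append]
    have h2 := alphaPairs_head_not t hc
    unfold alphaPairs at h2
    simp [alphaPairs, adjPairs, hc, h2]
  | a :: b :: xs' =>
    have hb : ∀ x ∈ b :: xs', PySem.Chars.isalpha x := by
      intro x hx; exact hxs x (by simp [List.mem_cons] at hx ⊢; tauto)
    have ih := alphaPairs_boundary (b :: xs') t hb hc
    have ha : PySem.Chars.isalpha a := hxs a (by simp)
    have hbb : PySem.Chars.isalpha b := hxs b (by simp)
    simp only [List.cons_append] at ih ⊢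
    simp [alphaPairs, adjPairs, ha, hbb] at ih ⊢
    rw [← List.cons_append]
    exact ih

lemma pending_eq (cs : List Char) (cur : List Char)
    (h : ∀ c ∈ cur, PySem.Chars.isalpha c) :
    pending cur cs = alphaPairs (cur ++ cs) := by
  induction cs generalizing cur with
  | nil => simp [pending, alphaPairs_of_all cur h]
  | cons c t ih =>
    by_cases hc : PySem.Chars.isalpha c
    · rw [show pending cur (c :: t) = pending (cur ++ [c]) t by simp [pending, hc]]
      rw [ih (cur ++ [c]) ?_]
      · simp
      · intro x hx
        rcases List.mem_append.mp hx with hx | hx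
        · exact h x hx
        · simp at hx; subst hx; exact hc
    · rw [show pending cur (c :: t) = adjPairs cur ++ pending [] t by simp [pending, hc]]
      rw [ih [] (by simp)]
      rw [alphaPairs_boundary cur t h hc]
      simp [alphaPairs_of_all cur h]

lemma pyRange_len (n : Nat) :
    PySem.List.pyRange 0 ((n : Int) - 1) 1 = List.map (Nat.cast : Nat → Int) (List.range (n - 1)) := by
  rw [PySem.List.pyRange_one]
  have : (((n : Int) - 1) - 0).toNat = n - 1 := by omega
  rw [this]
  simp only [zero_add]


-- A's loop body as a function of the 2-char slice
def stepA (s : PySem.Set String) (tmp : List Char) : PySem.Set String :=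
  match PySem.Chars.pyGet? tmp 0, PySem.Chars.pyGet? tmp 1 with
  | some a, some b =>
      if PySem.Chars.isalpha a && PySem.Chars.isalpha b then
        PySem.Set.add s (String.ofList tmp) else s
  | _, _ => s

lemma foldl_take_two (cs : List Char) (g : PySem.Set String → List Char → PySem.Set String)
    (init : PySem.Set String) :
    List.foldl (fun s k => g s ((cs.drop k).take 2)) init (List.range (cs.length - 1))
      = List.foldl (fun s ab => g s [ab.1, ab.2]) init (adjPairs cs) := by
  rw [← List.foldl_map, A_range_pairs, List.foldl_map]

lemma parse_eq (st : String) :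
    parse st = PySem.Set.len (PySem.Set.ofList
      ((alphaPairs (PySem.Chars.lower st.toList)).map (fun ab => String.ofList [ab.1, ab.2]))) := by
  unfold parse
  simp only [PySem.Str.lower, PySem.Str.len, String.toList_ofList, pyRange_len, List.foldl_map]
  set cs := PySem.Chars.lower st.toList with hcs
  have hbody : (fun (s : PySem.Set String) (k : Nat) =>
      (match PySem.Str.pyGet? (PySem.Str.slice (String.ofList cs) (some (k:Int)) (some ((k:Int) + 2))) 0,
             PySem.Str.pyGet? (PySem.Str.slice (String.ofList cs) (some (k:Int)) (some ((k:Int) + 2))) 1 with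
        | some a, some b =>
            if PySem.Chars.isalpha a && PySem.Chars.isalpha b then
              PySem.Set.add s (PySem.Str.slice (String.ofList cs) (some (k:Int)) (some ((k:Int) + 2))) else s
        | _, _ => s))
      = (fun s k => stepA s ((cs.drop k).take 2)) := by
    funext s k
    have h2 : PySem.List.slice cs (some (k:Int)) (some ((k:Int) + 2)) = (cs.drop k).take 2 := by
      simpa using PySem.List.slice_natCast_add cs k 2
    simp [stepA, PySem.Str.slice, PySem.Str.pyGet?, PySem.Chars.slice, h2]
  rw [hbody, foldl_take_two]
  have hbody2 : (fun (s : PySem.Set String) (ab : Char × Char) => stepA s [ab.1, ab.2])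
      = (fun s ab => if (fun (ab : Char × Char) => PySem.Chars.isalpha ab.1 && PySem.Chars.isalpha ab.2) ab
          then PySem.Set.add s ((fun (ab : Char × Char) => String.ofList [ab.1, ab.2]) ab) else s) := by
    funext s ab
    simp [stepA]
  rw [hbody2, foldl_add_if, PySem.Set.update_empty]
  rfl

lemma foldl_update {β : Type} (g : β → List String) (l : List β) (s0 : PySem.Set String) :
    l.foldl (fun s x => PySem.Set.update s (g x)) s0 = PySem.Set.update s0 (l.flatMap g) := by
  induction l generalizing s0 with
  | nil => simp [PySem.Set.update]
  | cons x t ih =>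
    simp only [List.foldl_cons, List.flatMap_cons, ih]
    simp [PySem.Set.update, List.foldl_append]

lemma parse_alt_eq (st : String) :
    parse_alt st = PySem.Set.len (PySem.Set.ofList
      ((alphaPairs (PySem.Chars.lower st.toList)).map (fun ab => String.ofList [ab.1, ab.2]))) := by
  unfold parse_alt
  set cs := PySem.Chars.lower st.toList with hcs
  have hstep : (fun (p : List (List Char) × List Char) ch =>
      if PySem.Chars.isalpha ch then (p.1, p.2 ++ [ch])
      else if p.2 ≠ [] then (p.1 ++ [p.2], []) else p) = runStep := by
    funext p ch; simp [runStep]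
  have hfin : ∀ p : List (List Char) × List Char,
      (if p.2 ≠ [] then p.1 ++ [p.2] else p.1) = runFinish p := by
    intro p; simp [runFinish]
  have hinner : (fun (s : PySem.Set String) (run : List Char) =>
      (run.zip (PySem.List.slice run (some 1) none)).foldl
        (fun s ab => PySem.Set.add s (String.ofList [ab.1, ab.2])) s)
      = (fun s run => PySem.Set.update s ((adjPairs run).map (fun ab => String.ofList [ab.1, ab.2]))) := by
    funext s run
    rw [PySem.List.slice_from_one, zip_tail_eq_adjPairs, PySem.Set.update_map_eq_foldl_add]
  simp only [hstep, hinner, hfin]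
  rw [foldl_update, ← List.map_flatMap, runs_flat, pending_eq cs [] (by simp),
    PySem.Set.update_empty]
  simp

-- ===== VERDICT (by name: the statement is the Claim_ definition above) =====
theorem parse_spec : Claim_equal_parse := by
  intro st _
  unfold Spec_parse
  rw [parse_eq, parse_alt_eq]
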